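-- pv_equiv track=rewrite | github.com/Roadelse/rdee-core | bin/htc.shcmd.py | borrowed_zip_withkey
-- ===== SOURCE A (Python) =====
-- def borrowed_zip_withkey(D: dict):
--     """
--     zip lists with keys, borrowed from rdee-python
--     --------------------------------
--     @2024-05-27
--     """
--     length = -1
--     for k, v in D.items():
--         assert hasattr(v, "__len__")
--         if length == -1:
--             length = len(v)
--         assert length == len(v), "Different length for list in zip_withkey values"
--
--     rst = []
--     keys = list(D.keys())
--     for ele in  list(zip(*list(D.values()))):
--         rst.append({keys[i]:ele[i] for i in range(len(keys))})
--     return rst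
-- ===== SOURCE B (Python) =====
-- def borrowed_zip_withkey(D: dict):
--     """zip dict value-lists into a list of keyed dicts, filling each row
--     column by column into preallocated row dicts."""
--     vals = list(D.values())
--     n = len(vals[0]) if vals else 0
--     rst = [dict() for _ in range(n)]
--     for k, v in D.items():
--         for i, x in enumerate(v):
--             rst[i][k] = x
--     return rst
-- ===== Notes on version B (the rewrite author's own statement) =====
-- stated objective: alternative
-- what changed: B preallocates one empty dict per row and fills the rows column by column (outer loop over the dict's key/value items, inner enumerate over each value list), instead of A's building each row at once from a zipped tuple of all value lists.
import Mathlib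
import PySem

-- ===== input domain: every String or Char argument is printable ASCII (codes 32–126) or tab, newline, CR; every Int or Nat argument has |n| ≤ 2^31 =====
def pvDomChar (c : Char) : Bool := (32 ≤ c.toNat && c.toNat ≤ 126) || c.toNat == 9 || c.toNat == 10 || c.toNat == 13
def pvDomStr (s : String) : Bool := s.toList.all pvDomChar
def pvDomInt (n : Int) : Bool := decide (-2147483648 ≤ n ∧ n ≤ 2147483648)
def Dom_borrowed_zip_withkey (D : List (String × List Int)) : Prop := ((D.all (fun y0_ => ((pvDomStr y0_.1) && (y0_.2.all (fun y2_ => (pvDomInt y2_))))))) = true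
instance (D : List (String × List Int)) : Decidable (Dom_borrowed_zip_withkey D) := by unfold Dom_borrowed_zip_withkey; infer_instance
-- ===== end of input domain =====

-- B fills preallocated row dicts column by column (key-outer, index-inner) instead of
-- building each row at once from a zipped tuple; alternative decomposition, same cost.

-- ===== PORT A =====
-- The Python argument is a dict; the association list is decoded with dict semantics
-- (insertion order, later duplicate keys overwrite in place) in both ports.
def borrowed_zip_withkey (D : List (String × List Int)) : List (List (String × Int)) :=
  let d := PySem.Dict.ofList D
  let keys := d.keys
  let vals := d.values
  -- list(zip(*vals)): row count is the minimum list length (0 when there are no lists)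
  let n : Nat := ((vals.map List.length).min?).getD 0
  (List.range n).map (fun i =>
    let ele := vals.map (fun v => v.getD i 0)
    -- {keys[i]: ele[i] for i in range(len(keys))}
    ((PySem.List.pyRange 0 (keys.length : Int) 1).foldl
        (fun dct j => dct.insert (PySem.List.pyGetD keys j "") (PySem.List.pyGetD ele j 0))
        PySem.Dict.empty).items)

-- ===== PORT B =====
def borrowed_zip_withkey_alt (D : List (String × List Int)) : List (List (String × Int)) :=
  let d := PySem.Dict.ofList D
  let vals := d.values
  -- n = len(vals[0]) if vals else 0
  let n : Nat := (vals.headD []).length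
  -- rst = [dict() for _ in range(n)]; then rst[i][k] = x column by column
  let filled := d.items.foldl
    (fun rst kv =>
      (PySem.List.enumerate kv.2 0).foldl
        (fun r p =>
          PySem.List.pySetD r p.1 ((PySem.List.pyGetD r p.1 PySem.Dict.empty).insert kv.1 p.2))
        rst)
    (List.replicate n PySem.Dict.empty)
  filled.map PySem.Dict.items

-- ===== PRECONDITION & SPEC =====
-- Pre_ excludes exactly the dicts whose value-lists have unequal lengths: there the
-- Python A fails its assert (AssertionError) and returns nothing.
def Pre_borrowed_zip_withkey (D : List (String × List Int)) : Prop :=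
  ∀ v ∈ (PySem.Dict.ofList D).values,
    v.length = ((PySem.Dict.ofList D).values.headD []).length
instance (D : List (String × List Int)) : Decidable (Pre_borrowed_zip_withkey D) := by
  unfold Pre_borrowed_zip_withkey; infer_instance

def pvWitness_borrowed_zip_withkey : (List (String × List Int)) :=
  [("a", [1, 2]), ("b", [3, 4])]

def Spec_borrowed_zip_withkey (D : List (String × List Int)) (out : List (List (String × Int))) : Prop := out = borrowed_zip_withkey_alt D
instance (D : List (String × List Int)) (out : List (List (String × Int))) : Decidable (Spec_borrowed_zip_withkey D out) := by unfold Spec_borrowed_zip_withkey; infer_instance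

-- ===== CLAIM (what is proved, stated in full; the proofs are below) =====
def Claim_equal_borrowed_zip_withkey : Prop := ∀ (D : List (String × List Int)), Dom_borrowed_zip_withkey D → Pre_borrowed_zip_withkey D → Spec_borrowed_zip_withkey D (borrowed_zip_withkey D)

-- ===== LEMMAS AND PROOFS =====

theorem pv_min?_of_all_eq (m : Nat) : ∀ (l : List Nat), l ≠ [] → (∀ x ∈ l, x = m) → l.min? = some m := by
  intro l
  induction l with
  | nil => intro h; exact absurd rfl h
  | cons a t ih =>
    intro _ hall
    have ha : a = m := hall a (by simp)
    match t with
    | [] => simp [ha]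
    | b :: t' =>
      have ht : (b :: t').min? = some m := ih (by simp) (fun x hx => hall x (by simp [hx]))
      rw [List.min?_cons, ht, ha]
      simp

theorem pv_inner (k : String) :
    ∀ (v : List Int) (s : Nat) (rst : List (PySem.Dict String Int)),
      s + v.length ≤ rst.length →
      (PySem.List.enumerate v (s : Int)).foldl
          (fun r p =>
            PySem.List.pySetD r p.1 ((PySem.List.pyGetD r p.1 PySem.Dict.empty).insert k p.2))
          rst
        = rst.take s ++ (List.zipWith (fun d x => d.insert k x) (rst.drop s) v)
            ++ rst.drop (s + v.length) := by
  intro v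
  induction v with
  | nil => intro s rst h; simp [PySem.List.enumerate]
  | cons x v ih =>
    intro s rst h
    have hlen : s + 1 + v.length ≤ rst.length := by simp [List.length_cons] at h; omega
    have hs : s < rst.length := by omega
    rw [PySem.List.enumerate_cons]
    simp only [List.foldl_cons]
    have hstep : PySem.List.pySetD rst (s : Int)
        ((PySem.List.pyGetD rst (s : Int) PySem.Dict.empty).insert k x)
        = rst.set s ((rst[s]'hs).insert k x) := by
      rw [PySem.List.pySetD_natCast, PySem.List.pyGetD_natCast, List.getD_eq_getElem rst _ hs]
    have hcast : (s : Int) + 1 = ((s + 1 : Nat) : Int) := by push_cast; ring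
    rw [hstep, hcast, ih (s+1) _ (by simpa using hlen)]
    set y := (rst[s]'hs).insert k x with hy
    have h1 : (rst.set s y).take (s+1) = rst.take s ++ [y] := by
      rw [List.take_add_one, List.take_set]
      rw [List.set_eq_of_length_le (by simp [List.length_take])]
      rw [List.getElem?_set_self (by simpa using hs)]
      show rst.take s ++ [y] = rst.take s ++ [y]
      rfl
    have h2 : (rst.set s y).drop (s+1) = rst.drop (s+1) := by
      rw [List.drop_set]
      simp
    have h3 : rst.drop s = (rst[s]'hs) :: rst.drop (s+1) := by
      exact List.drop_eq_getElem_cons hs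
    rw [h1, h2, h3]
    simp only [List.zipWith_cons_cons]
    have h4 : s + 1 + v.length = s + (x :: v).length := by simp; omega
    rw [h4, List.drop_set, if_pos (by simp)]
    simp [hy, List.append_assoc]

theorem pv_zipWith_map_range (m : Nat) (k : String) (g : Nat → PySem.Dict String Int)
    (v : List Int) (hv : v.length = m) :
    List.zipWith (fun d x => d.insert k x) ((List.range m).map g) v
      = (List.range m).map (fun i => (g i).insert k (v.getD i 0)) := by
  apply List.ext_getElem
  · simp [hv]
  · intro i h1 h2
    have him : i < m := by simpa using h2
    have hiv : i < v.length := by omega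
    simp only [List.getElem_zipWith, List.getElem_map, List.getElem_range]
    rw [List.getD_eq_getElem v _ hiv]

theorem pv_outer (m : Nat) :
    ∀ (l : List (String × List Int)) (g : Nat → PySem.Dict String Int),
      (∀ kv ∈ l, kv.2.length = m) →
      l.foldl
          (fun rst kv =>
            (PySem.List.enumerate kv.2 0).foldl
              (fun r p =>
                PySem.List.pySetD r p.1 ((PySem.List.pyGetD r p.1 PySem.Dict.empty).insert kv.1 p.2))
              rst)
          ((List.range m).map g)
        = (List.range m).map
            (fun i => l.foldl (fun d kv => d.insert kv.1 (kv.2.getD i 0)) (g i)) := by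
  intro l
  induction l with
  | nil => intro g _; simp
  | cons kv l ih =>
    intro g hall
    have hv : kv.2.length = m := hall kv (by simp)
    simp only [List.foldl_cons]
    have h0 : ((0 : Int)) = ((0 : Nat) : Int) := by norm_num
    have hstep := pv_inner kv.1 kv.2 0 ((List.range m).map g)
      (by simp [hv])
    rw [h0, hstep]
    simp only [List.take_zero, List.drop_zero, List.nil_append]
    have hdrop : ((List.range m).map g).drop (0 + kv.2.length) = [] := by
      simp [hv]
    rw [hdrop, List.append_nil]
    rw [pv_zipWith_map_range m kv.1 g kv.2 hv]
    exact ih (fun i => (g i).insert kv.1 (kv.2.getD i 0)) (fun x hx => hall x (by simp [hx]))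

theorem pv_rowA (l : List (String × List Int)) (hnd : (l.map (·.1)).Nodup) (i : Nat) :
    ((PySem.List.pyRange 0 ((l.map (·.1)).length : Int) 1).foldl
        (fun dct j => dct.insert (PySem.List.pyGetD (l.map (·.1)) j "")
          (PySem.List.pyGetD ((l.map (·.2)).map (fun v => v.getD i 0)) j 0))
        PySem.Dict.empty).items
      = l.map (fun kv => (kv.1, kv.2.getD i 0)) := by
  have hkeys : (PySem.List.pyRange 0 ((l.map (·.1)).length : Int) 1).map
      (fun j => PySem.List.pyGetD (l.map (·.1)) j "") = l.map (·.1) :=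
    PySem.List.map_pyGetD_pyRange_zero' (l.map (·.1)) ""
  rw [PySem.Dict.items_foldl_insert_fresh _ _ _ _
      (by intro a _; exact PySem.Dict.contains_empty _)
      (by rw [hkeys]; exact hnd)]
  simp only [PySem.Dict.empty, List.nil_append]
  rw [show ((l.map (·.1)).length : Int) = (l.length : Int) by simp]
  rw [PySem.List.pyRange_one]
  simp only [Int.sub_zero, Int.toNat_natCast, List.map_map]
  apply List.ext_getElem
  · simp
  · intro j h1 h2
    have hj : j < l.length := by simpa using h2
    simp only [Function.comp, List.getElem_map, List.getElem_range]
    rw [show (0 : Int) + (j : Int) = ((j : Nat) : Int) by simp]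
    rw [PySem.List.pyGetD_natCast, PySem.List.pyGetD_natCast]
    rw [List.getD_eq_getElem _ _ (by simpa using hj), List.getD_eq_getElem _ _ (by simpa using hj)]
    simp

-- ===== VERDICT (by name: the statement is the Claim_ definition above) =====
theorem borrowed_zip_withkey_spec : Claim_equal_borrowed_zip_withkey := by
  intro D _ hpre
  show borrowed_zip_withkey D = borrowed_zip_withkey_alt D
  unfold borrowed_zip_withkey borrowed_zip_withkey_alt
  simp only [PySem.Dict.keys, PySem.Dict.values]
  set l := (PySem.Dict.ofList D).items with hl
  have hnd : (l.map (·.1)).Nodup := by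
    have h := PySem.Dict.nodup_keys_ofList (κ := String) (ν := List Int) D
    simpa [PySem.Dict.keys, hl] using h
  have hall : ∀ kv ∈ l, kv.2.length = ((l.map (·.2)).headD []).length := by
    intro kv hkv
    have := hpre kv.2 (by simp only [PySem.Dict.values]; exact List.mem_map_of_mem hkv)
    simpa [PySem.Dict.values] using this
  set m := ((l.map (·.2)).headD []).length with hm
  by_cases hemp : l = []
  · have hm0 : m = 0 := by rw [hm, hemp]; simp
    simp [hemp, hm0]
  · have hmin : ((l.map (·.2)).map List.length).min? = some m := by
      apply pv_min?_of_all_eq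
      · simp [hemp]
      · intro x hx
        simp only [List.map_map, List.mem_map] at hx
        obtain ⟨kv, hkv, rfl⟩ := hx
        exact hall kv hkv
    rw [hmin]
    rw [show List.replicate m (PySem.Dict.empty : PySem.Dict String Int)
        = (List.range m).map (fun _ => PySem.Dict.empty) by simp]
    rw [pv_outer m l (fun _ => PySem.Dict.empty) hall]
    rw [List.map_map]
    apply List.map_congr_left
    intro i _
    rw [pv_rowA l hnd i]
    simp only [Function.comp]
    rw [PySem.Dict.items_foldl_insert_fresh _ _ _ _
        (by intro a _; exact PySem.Dict.contains_empty _) (by exact hnd)]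
    simp [PySem.Dict.empty]
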